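-- pv_equiv track=rewrite | github.com/osaaaam/AutoraceWebService2 | lambda/function/module/scraping.py | get_position_x
-- ===== SOURCE A (Python) =====
-- def get_position_x(l_hande):
--     l_position_x = []
--     for i in range(len(l_hande)):
--         # 1号車の場合
--         if i == 0:
--             l_position_x.append(1)
--         # 2号車以降の場合
--         else:
--             if l_hande[i] == l_hande[i-1]:
--                 l_position_x.append(l_position_x[i-1]+1)
--             else:
--                 l_position_x.append(1)
--     return l_position_x
-- ===== SOURCE B (Python) =====
-- def get_position_x(l_hande):
--     result = []
--     i = 0
--     n = len(l_hande)
--     while i < n: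
--         j = i
--         while j < n and l_hande[j] == l_hande[i]:
--             j += 1
--         result.extend(range(1, j - i + 1))
--         i = j
--     return result
-- ===== Notes on version B (the rewrite author's own statement) =====
-- stated objective: alternative
-- what changed: B splits the list into maximal runs of consecutive equal elements and emits 1..len(run) for each run, instead of A's comparison with the previous element and index-back into the result list being built.
import Mathlib
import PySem

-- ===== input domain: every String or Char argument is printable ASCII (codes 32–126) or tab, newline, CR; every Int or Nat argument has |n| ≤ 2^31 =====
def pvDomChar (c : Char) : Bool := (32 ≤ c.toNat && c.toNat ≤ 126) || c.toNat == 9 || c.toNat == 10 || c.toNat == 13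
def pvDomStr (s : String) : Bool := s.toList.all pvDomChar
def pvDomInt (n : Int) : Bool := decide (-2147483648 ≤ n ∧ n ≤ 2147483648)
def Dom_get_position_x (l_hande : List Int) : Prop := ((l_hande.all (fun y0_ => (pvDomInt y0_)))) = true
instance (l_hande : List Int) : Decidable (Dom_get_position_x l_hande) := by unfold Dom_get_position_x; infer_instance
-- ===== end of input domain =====

-- B replaces A's compare-to-previous loop (which indexes back into the result being built)
-- by splitting the input into maximal runs of equal elements and emitting 1..len(run) per run;
-- same cost, different structure (objective: alternative).

-- ===== PORT A =====
-- for i in range(len(l_hande)): append 1 / l_position_x[i-1]+1 / 1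
def get_position_x (l_hande : List Int) : List Int :=
  (PySem.List.pyRange 0 (l_hande.length : Int) 1).foldl
    (fun l_position_x i =>
      if i = 0 then l_position_x ++ [1]
      else if PySem.List.pyGetD l_hande i 0 = PySem.List.pyGetD l_hande (i - 1) 0 then
        l_position_x ++ [PySem.List.pyGetD l_position_x (i - 1) 0 + 1]
      else l_position_x ++ [1]) []

-- ===== PORT B =====
-- outer while: peel one maximal run (inner while = takeWhile/dropWhile scan), extend with range(1, runlen+1)
def pvAltGo (l : List Int) : List Int :=
  match l with
  | [] => []
  | x :: xs =>
    PySem.List.pyRange 1 (((xs.takeWhile (· == x)).length : Int) + 2) 1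
      ++ pvAltGo (xs.dropWhile (· == x))
termination_by l.length
decreasing_by
  simp only [List.length_cons]
  exact Nat.lt_succ_of_le (List.length_dropWhile_le _ _)

def get_position_x_alt (l_hande : List Int) : List Int := pvAltGo l_hande

-- ===== PRECONDITION & SPEC =====
def Spec_get_position_x (l_hande : List Int) (out : List Int) : Prop := out = get_position_x_alt l_hande
instance (l_hande : List Int) (out : List Int) : Decidable (Spec_get_position_x l_hande out) := by unfold Spec_get_position_x; infer_instance

-- ===== CLAIM (what is proved, stated in full; the proofs are below) =====
def Claim_equal_get_position_x : Prop := ∀ (l_hande : List Int), Dom_get_position_x l_hande → Spec_get_position_x l_hande (get_position_x l_hande)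

-- ===== LEMMAS AND PROOFS =====

-- reference: position counters computed with an explicit (previous value, counter) state
def pvCgo (p c : Int) : List Int → List Int
  | [] => []
  | x :: xs => if x = p then (c + 1) :: pvCgo x (c + 1) xs else 1 :: pvCgo x 1 xs

def pvCref : List Int → List Int
  | [] => []
  | x :: xs => 1 :: pvCgo x 1 xs

theorem pvCgo_length (m : List Int) : ∀ p c, (pvCgo p c m).length = m.length := by
  induction m with
  | nil => intro p c; rfl
  | cons y t ih =>
    intro p c
    simp only [pvCgo]
    split <;> simp [ih]

theorem pvCref_length (m : List Int) : (pvCref m).length = m.length := by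
  cases m with
  | nil => rfl
  | cons y t => simp [pvCref, pvCgo_length]

theorem pvCgo_snoc (t : List Int) : ∀ p c x, pvCgo p c (t ++ [x]) =
    pvCgo p c t ++ [if (p :: t).getLast? = some x then ((c :: pvCgo p c t).getLast?.getD 0) + 1 else 1] := by
  induction t with
  | nil =>
    intro p c x
    simp only [List.nil_append, pvCgo, List.getLast?_singleton, Option.some.injEq]
    by_cases h : x = p
    · simp [h]
    · rw [if_neg h, if_neg (fun hh => h hh.symm)]
  | cons y t' ih =>
    intro p c x
    simp only [List.cons_append, pvCgo]
    by_cases h : y = p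
    · rw [if_pos h, if_pos h, ih]
      simp [List.getLast?_cons_cons]
    · rw [if_neg h, if_neg h, ih]
      simp [List.getLast?_cons_cons]

theorem pvCref_snoc (m : List Int) (x : Int) : pvCref (m ++ [x]) =
    pvCref m ++ [if m.getLast? = some x then ((pvCref m).getLast?.getD 0) + 1 else 1] := by
  cases m with
  | nil => simp [pvCref, pvCgo]
  | cons y t =>
    simp only [List.cons_append, pvCref, pvCgo_snoc]

-- invariant of A's loop: after k iterations the accumulator is the counters of the first k elements
theorem pvA_inv (l : List Int) (k : Nat) (hk : k ≤ l.length) :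
    (PySem.List.pyRange 0 (k : Int) 1).foldl
      (fun l_position_x i =>
        if i = 0 then l_position_x ++ [1]
        else if PySem.List.pyGetD l i 0 = PySem.List.pyGetD l (i - 1) 0 then
          l_position_x ++ [PySem.List.pyGetD l_position_x (i - 1) 0 + 1]
        else l_position_x ++ [1]) []
    = pvCref (l.take k) := by
  induction k with
  | zero => simp [PySem.List.pyRange_one_eq_nil, pvCref]
  | succ k ih =>
    have hk' : k ≤ l.length := Nat.le_of_succ_le hk
    have hklt : k < l.length := hk
    rw [show ((k + 1 : Nat) : Int) = (k : Int) + 1 by push_cast; ring,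
        PySem.List.pyRange_one_succ_right (by exact_mod_cast Nat.zero_le k), List.foldl_append, ih hk']
    simp only [List.foldl_cons, List.foldl_nil]
    have htake : l.take (k + 1) = l.take k ++ [l[k]] := by
      rw [List.take_add_one, List.getElem?_eq_getElem hklt]
      rfl
    rw [htake, pvCref_snoc]
    by_cases h0 : (k : Int) = 0
    · have : k = 0 := by exact_mod_cast h0
      subst this
      simp [pvCref]
    · have hk1 : 1 ≤ k := by omega
      rw [if_neg h0]
      have e2 : ((k : Int) - 1) = ((k - 1 : Nat) : Int) := by push_cast [hk1]; ring
      have e1 : PySem.List.pyGetD l (k : Int) 0 = l[k] := by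
        rw [PySem.List.pyGetD_natCast, List.getD_eq_getElem?_getD, List.getElem?_eq_getElem hklt]
        rfl
      have e3 : PySem.List.pyGetD l ((k : Int) - 1) 0 = l[k - 1] := by
        rw [e2, PySem.List.pyGetD_natCast, List.getD_eq_getElem?_getD,
            List.getElem?_eq_getElem (by omega : k - 1 < l.length)]
        rfl
      have hlen : (pvCref (l.take k)).length = k := by
        rw [pvCref_length, List.length_take, Nat.min_eq_left hk']
      have e4 : PySem.List.pyGetD (pvCref (l.take k)) ((k : Int) - 1) 0
          = (pvCref (l.take k)).getLast?.getD 0 := by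
        rw [e2, PySem.List.pyGetD_natCast, List.getD_eq_getElem?_getD,
            List.getLast?_eq_getElem?, hlen]
      have e5 : (l.take k).getLast? = some l[k - 1] := by
        rw [List.getLast?_eq_getElem?, List.length_take, Nat.min_eq_left hk']
        rw [List.getElem?_take_of_lt (by omega), List.getElem?_eq_getElem (by omega : k - 1 < l.length)]
      rw [e1, e3, e4, e5]
      by_cases hc : l[k] = l[k - 1]
      · rw [if_pos hc, if_pos (by simp [hc])]
      · rw [if_neg hc, if_neg (by simp; exact fun hh => hc hh.symm)]

-- peeling the head off a shifted range of counters
theorem pvMapShift (n : Nat) (c : Int) :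
    (List.range (n + 1)).map (fun k : Nat => c + (k : Int))
      = c :: (List.range n).map (fun k : Nat => c + 1 + (k : Int)) := by
  apply List.ext_getElem
  · simp
  · intro i h1 h2
    cases i with
    | zero => simp
    | succ j =>
      simp only [List.getElem_map, List.getElem_range, List.getElem_cons_succ]
      push_cast
      ring

-- pvCgo along a run of elements all equal to p
theorem pvCgo_run (r : List Int) : ∀ (p c : Int) (rest : List Int), (∀ y ∈ r, y = p) →
    pvCgo p c (r ++ rest) =
      (List.range r.length).map (fun k : Nat => c + 1 + (k : Int)) ++ pvCgo p (c + (r.length : Int)) rest := by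
  induction r with
  | nil => intro p c rest _; simp
  | cons z r' ih =>
    intro p c rest hall
    have hz : z = p := hall z (by simp)
    subst hz
    simp only [List.cons_append, pvCgo]
    rw [if_pos trivial, ih z (c + 1) rest (fun y hy => hall y (by simp [hy]))]
    simp only [List.length_cons]
    rw [show (c + ((r'.length + 1 : Nat) : Int)) = c + 1 + (r'.length : Int) by push_cast; ring]
    rw [pvMapShift r'.length (c + 1), List.cons_append]

theorem pvCgo_boundary (p c : Int) (rest : List Int) (h : rest.head? ≠ some p) :
    pvCgo p c rest = pvCref rest := by
  cases rest with
  | nil => rfl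
  | cons z rs =>
    have : z ≠ p := fun hh => h (by simp [hh])
    simp [pvCgo, pvCref, this]

theorem pvAltGo_eq (l : List Int) : pvAltGo l = pvCref l := by
  induction l using pvAltGo.induct with
  | case1 => simp [pvAltGo, pvCref]
  | case2 x xs ih =>
    rw [pvAltGo, ih]
    set tw := xs.takeWhile (· == x) with htw
    set dw := xs.dropWhile (· == x) with hdw
    have hxs : xs = tw ++ dw := (List.takeWhile_append_dropWhile (p := (· == x)) (l := xs)).symm
    have hall : ∀ y ∈ tw, y = x := by
      intro y hy
      exact beq_iff_eq.mp (List.mem_takeWhile_imp (p := (· == x)) (l := xs) hy)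
    have hhead : dw.head? ≠ some x := by
      intro hc
      cases hd : dw with
      | nil => simp [hd] at hc
      | cons z zs =>
        rw [hd] at hc
        simp only [List.head?_cons, Option.some.injEq] at hc
        have := List.head?_dropWhile_not (· == x) xs
        rw [← hdw, hd] at this
        simp [hc] at this
    conv_rhs => rw [pvCref, hxs, pvCgo_run tw x 1 dw hall, pvCgo_boundary x _ dw hhead]
    rw [PySem.List.pyRange_one]
    rw [show (((tw.length : Int) + 2 - 1)).toNat = tw.length + 1 by omega]
    rw [pvMapShift tw.length 1, List.cons_append]

-- ===== VERDICT (by name: the statement is the Claim_ definition above) =====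
theorem get_position_x_spec : Claim_equal_get_position_x := by
  intro l _
  show get_position_x l = get_position_x_alt l
  rw [get_position_x_alt, pvAltGo_eq, get_position_x, pvA_inv l l.length le_rfl, List.take_length]
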